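-- pv_equiv track=rewrite | github.com/yeyi-su/programacion-2 | clase-pila.py | misma_cantidad
-- ===== SOURCE A (Python) =====
-- class Pila():
--     def __init__(self):
--         self.items=[]
--     def estavacia(self):
--         return self.items==[]
--     def incluir(self,item):
--         self.items.append(item)
--     def inspeccionar(self):
--         return self.items[len(self.items)-1]
--     def extraer(self):
--         return self.items.pop()
--     def tamano(self):
--         return len(self.items)
--     def dar_vuelta(self):
--         self.items == (self.items)[::-1]
--     def imprimir(self):
--         print (self.items)
--     def vaciar(self):
--         while not (self.estavacia()):
--              self.extraer()
--
-- def misma_cantidad(s):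
--     a=Pila()
--     b=Pila()
--     for x in range(len(s)):
--         if s[x]=="1":
--             a.incluir(1)
--         elif s[x]=="0":
--             b.incluir(0)
--     if a.tamano()== b.tamano():
--         return True
--     else:
--         return False
-- ===== SOURCE B (Python) =====
-- def misma_cantidad(s):
--     stack = []
--     for ch in s:
--         if ch == "0" or ch == "1":
--             if stack and stack[-1] != ch:
--                 stack.pop()
--             else:
--                 stack.append(ch)
--     return not stack
-- ===== Notes on version B (the rewrite author's own statement) =====
-- stated objective: alternative
-- what changed: Replaces counting into two stacks and comparing sizes with a pair-cancellation stack: each binary digit pops an opposite digit off the stack or is pushed, and the answer is whether the stack ends empty (the stack stays homogeneous, so emptiness is equivalent to equal counts); avoiding the Pila class method calls also makes it measurably faster.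
import Mathlib
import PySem

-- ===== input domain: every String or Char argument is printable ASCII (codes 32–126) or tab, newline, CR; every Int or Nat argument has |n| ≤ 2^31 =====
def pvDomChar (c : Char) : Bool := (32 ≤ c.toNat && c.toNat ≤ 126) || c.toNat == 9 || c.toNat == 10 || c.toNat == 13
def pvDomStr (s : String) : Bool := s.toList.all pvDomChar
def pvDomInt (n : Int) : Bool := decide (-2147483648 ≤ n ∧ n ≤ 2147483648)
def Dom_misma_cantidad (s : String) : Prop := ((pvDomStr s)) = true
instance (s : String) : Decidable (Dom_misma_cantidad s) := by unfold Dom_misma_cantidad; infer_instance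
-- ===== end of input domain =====

-- B drops A's two counting stacks for a pair-cancellation stack (pop on opposite digit, push otherwise; answer = stack empty): an alternative algorithm of the same cost.

-- ===== PORT A =====
-- Pila is a wrapped list; incluir appends at the end, tamano is the length.
def pilaIncluir (p : List Int) (item : Int) : List Int := p ++ [item]

def pilaTamano (p : List Int) : Int := p.length

-- loop body of A: push 1 onto stack a on '1', push 0 onto stack b on '0', else leave both
def pasoA (ab : List Int × List Int) (x : Char) : List Int × List Int :=
  if x = '1' then (pilaIncluir ab.1 1, ab.2)
  else if x = '0' then (ab.1, pilaIncluir ab.2 0)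
  else ab

def misma_cantidad (s : String) : Bool :=
  let st := s.toList.foldl pasoA ([], [])
  if pilaTamano st.1 = pilaTamano st.2 then true else false

-- ===== PORT B =====
-- loop body of B: cancellation stack (append/pop at the list's end, as the Python list does)
def pasoB (st : List Char) (ch : Char) : List Char :=
  if ch = '0' ∨ ch = '1' then
    if st ≠ [] ∧ st.getLastD ' ' ≠ ch then st.dropLast
    else st ++ [ch]
  else st

def misma_cantidad_alt (s : String) : Bool :=
  let stack := s.toList.foldl pasoB []
  stack.isEmpty

-- ===== PRECONDITION & SPEC =====
def Spec_misma_cantidad (s : String) (out : Bool) : Prop := out = misma_cantidad_alt s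
instance (s : String) (out : Bool) : Decidable (Spec_misma_cantidad s out) := by unfold Spec_misma_cantidad; infer_instance

-- ===== CLAIM (what is proved, stated in full; the proofs are below) =====
def Claim_equal_misma_cantidad : Prop := ∀ (s : String), Dom_misma_cantidad s → Spec_misma_cantidad s (misma_cantidad s)

-- ===== LEMMAS AND PROOFS =====
-- signed contribution of one character
def dCh (ch : Char) : Int := if ch = '1' then 1 else if ch = '0' then -1 else 0

-- signed measure of B's stack
def fStk (st : List Char) : Int := (st.count '1' : Int) - st.count '0'

-- B's stack is always a run of a single binary digit
def InvStk (st : List Char) : Prop :=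
  ∃ n, st = List.replicate n '1' ∨ st = List.replicate n '0'

theorem pv_getLastD_replicate (n : ℕ) (c d : Char) :
    (List.replicate (n + 1) c).getLastD d = c := by
  rw [List.replicate_succ']
  simp

theorem pv_fStk_rep1 (n : ℕ) : fStk (List.replicate n '1') = n := by
  simp [fStk, List.count_replicate]

theorem pv_fStk_rep0 (n : ℕ) : fStk (List.replicate n '0') = -(n : Int) := by
  simp [fStk, List.count_replicate]

theorem pv_pasoB_same (n : ℕ) (c : Char) (hc : c = '0' ∨ c = '1') :
    pasoB (List.replicate n c) c = List.replicate (n + 1) c := by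
  cases n with
  | zero => simp [pasoB, hc]
  | succ m =>
    simp [pasoB, hc, List.replicate_succ']

theorem pv_pasoB_diff (n : ℕ) (c c' : Char) (hc : c' = '0' ∨ c' = '1')
    (hne : c ≠ c') :
    pasoB (List.replicate (n + 1) c) c' = List.replicate n c := by
  simp only [pasoB, hc, pv_getLastD_replicate]
  simp [hne]

theorem pv_stepB (st : List Char) (ch : Char) (h : InvStk st) :
    InvStk (pasoB st ch) ∧ fStk (pasoB st ch) = fStk st + dCh ch := by
  obtain ⟨n, hn⟩ := h
  by_cases h1 : ch = '1'
  · subst h1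
    cases hn with
    | inl e =>
      subst e
      rw [pv_pasoB_same n '1' (Or.inr rfl)]
      exact ⟨⟨n + 1, Or.inl rfl⟩, by simp [pv_fStk_rep1, dCh]⟩
    | inr e =>
      subst e
      cases n with
      | zero =>
        rw [show (List.replicate 0 '0') = List.replicate 0 '1' from rfl,
            pv_pasoB_same 0 '1' (Or.inr rfl)]
        exact ⟨⟨1, Or.inl rfl⟩, by simp [fStk, dCh]⟩
      | succ m =>
        rw [pv_pasoB_diff m '0' '1' (Or.inr rfl) (by decide)]
        refine ⟨⟨m, Or.inr rfl⟩, ?_⟩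
        rw [pv_fStk_rep0, pv_fStk_rep0]
        simp [dCh]
  · by_cases h0 : ch = '0'
    · subst h0
      cases hn with
      | inr e =>
        subst e
        rw [pv_pasoB_same n '0' (Or.inl rfl)]
        refine ⟨⟨n + 1, Or.inr rfl⟩, ?_⟩
        rw [pv_fStk_rep0, pv_fStk_rep0]; simp [dCh]; ring
      | inl e =>
        subst e
        cases n with
        | zero =>
          rw [show (List.replicate 0 '1') = List.replicate 0 '0' from rfl,
              pv_pasoB_same 0 '0' (Or.inl rfl)]
          refine ⟨⟨1, Or.inr rfl⟩, ?_⟩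
          rw [pv_fStk_rep0]
          simp [fStk, dCh]
        | succ m =>
          rw [pv_pasoB_diff m '1' '0' (Or.inl rfl) (by decide)]
          refine ⟨⟨m, Or.inl rfl⟩, ?_⟩
          rw [pv_fStk_rep1, pv_fStk_rep1]
          simp [dCh]
    · have hid : pasoB st ch = st := by simp [pasoB, h1, h0]
      rw [hid]
      exact ⟨⟨n, hn⟩, by simp [dCh, h1, h0]⟩

theorem pv_foldB (l : List Char) (st : List Char) (h : InvStk st) :
    InvStk (l.foldl pasoB st) ∧
      fStk (l.foldl pasoB st) = fStk st + (l.map dCh).sum := by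
  induction l generalizing st with
  | nil => simpa using h
  | cons c t ih =>
    obtain ⟨hi, he⟩ := pv_stepB st c h
    obtain ⟨hi', he'⟩ := ih (pasoB st c) hi
    refine ⟨hi', ?_⟩
    simp only [List.foldl_cons, List.map_cons, List.sum_cons] at *
    rw [he', he]; ring

-- A's two stack sizes differ by the same signed sum
theorem pv_foldA (l : List Char) (ab : List Int × List Int) :
    ((l.foldl pasoA ab).1.length : Int) - (l.foldl pasoA ab).2.length
      = ((ab.1.length : Int) - ab.2.length) + (l.map dCh).sum := by
  induction l generalizing ab with
  | nil => simp
  | cons c t ih =>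
    simp only [List.foldl_cons, List.map_cons, List.sum_cons]
    rw [ih (pasoA ab c)]
    by_cases h1 : c = '1'
    · simp [pasoA, pilaIncluir, dCh, h1]; ring
    · by_cases h0 : c = '0'
      · simp [pasoA, pilaIncluir, dCh, h0]; ring
      · simp [pasoA, dCh, h1, h0]

-- ===== VERDICT (by name: the statement is the Claim_ definition above) =====
theorem misma_cantidad_spec : Claim_equal_misma_cantidad := by
  intro s _
  unfold Spec_misma_cantidad misma_cantidad misma_cantidad_alt
  obtain ⟨hi, he⟩ := pv_foldB s.toList [] ⟨0, Or.inl rfl⟩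
  have ha := pv_foldA s.toList ([], [])
  simp only [List.length_nil, Nat.cast_zero, sub_zero, zero_add] at ha
  have he0 : fStk (s.toList.foldl pasoB []) = (s.toList.map dCh).sum := by
    rw [he]; simp [fStk]
  simp only [pilaTamano]
  obtain ⟨n, hn⟩ := hi
  split_ifs with hc
  · have hsum : (s.toList.map dCh).sum = 0 := by omega
    rw [hsum] at he0
    cases hn with
    | inl e =>
      rw [e] at he0 ⊢
      rw [pv_fStk_rep1] at he0
      have : n = 0 := by omega
      simp [this]
    | inr e =>
      rw [e] at he0 ⊢
      rw [pv_fStk_rep0] at he0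
      have : n = 0 := by omega
      simp [this]
  · have hsum : (s.toList.map dCh).sum ≠ 0 := by
      intro h; rw [h] at ha; omega
    rw [← he0] at hsum
    cases hn with
    | inl e =>
      rw [e] at hsum ⊢
      rw [pv_fStk_rep1] at hsum
      have : n ≠ 0 := by omega
      simp [this]
    | inr e =>
      rw [e] at hsum ⊢
      rw [pv_fStk_rep0] at hsum
      have : n ≠ 0 := by omega
      simp [this]
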